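-- pv_equiv track=rewrite | github.com/sMaxym/number_game | ulamNumber.py | ulamNumbers
-- ===== SOURCE A (Python) =====
-- def ulamNumbers(number):
--     '''
--     int -> boolen
--     Function check if number is Ulam or not
--     >>> ulamNumber(6)
--     True
--     >>> ulamNumber(29)
--     False
--     >>> ulamNumber(-9)
--     False
--     '''
--     if number <= 0:
--         return False
--     ulam = [1,2]
--     coefficient = 0
--     for helpForUlam1 in range(3,number+1):
--         indicator = (helpForUlam1//2)+1 if helpForUlam1%2==1\
--                                        else helpForUlam1 // 2
--         for helpForUlam2  in range(1,indicator):
--             if (helpForUlam2 in ulam) and \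
--             (helpForUlam1-helpForUlam2 in ulam):
--                 coefficient += 1
--         if coefficient == 1:
--             ulam.append(helpForUlam1)
--         coefficient = 0
--     for overtaking in range(number):
--         if number in ulam:
--             return True
--         else:
--             return False
-- ===== SOURCE B (Python) =====
-- def ulamNumbers(number):
--     if number <= 0:
--         return False
--     ulam = [1, 2]
--     count = {3: 1}  # count[m] = number of ways m = a+b with a<b both already-found Ulam
--     for c in range(3, number + 1):
--         if count.get(c, 0) == 1:
--             for v in ulam:
--                 count[c + v] = count.get(c + v, 0) + 1
--             ulam.append(c)
--     return number in ulam
-- ===== Notes on version B (the rewrite author's own statement) =====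
-- stated objective: faster
-- what changed: Replaces A's per-candidate rescan (a range loop with two list-membership scans per k) by a single forward sweep that maintains a dict of pair-sum representation counts, updated once when a new Ulam number is found.
import Mathlib
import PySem

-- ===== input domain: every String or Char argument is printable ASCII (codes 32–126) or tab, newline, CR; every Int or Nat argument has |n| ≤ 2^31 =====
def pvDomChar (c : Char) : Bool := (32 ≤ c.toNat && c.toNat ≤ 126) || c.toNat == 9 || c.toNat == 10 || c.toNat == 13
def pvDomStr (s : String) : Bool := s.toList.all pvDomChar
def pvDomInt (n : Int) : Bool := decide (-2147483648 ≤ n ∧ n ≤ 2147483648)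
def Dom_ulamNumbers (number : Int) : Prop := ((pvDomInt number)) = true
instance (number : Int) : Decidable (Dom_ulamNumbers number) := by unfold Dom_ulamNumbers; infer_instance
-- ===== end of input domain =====

-- B replaces A's per-candidate pair rescan by one sweep maintaining a dict of pair-sum counts (faster).

-- ===== PORT A =====
-- one iteration of A's outer loop: count pairs by scanning range(1, indicator), append if exactly one
def ulamStepA (ulam : List Int) (h : Int) : List Int :=
  let indicator := if PySem.Int.mod h 2 == 1 then PySem.Int.floordiv h 2 + 1
                   else PySem.Int.floordiv h 2
  let coefficient := (PySem.List.pyRange 1 indicator 1).foldl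
    (fun c k => if ulam.contains k && ulam.contains (h - k) then c + 1 else c) (0 : Int)
  if coefficient == 1 then ulam ++ [h] else ulam

def ulamNumbers (number : Int) : Bool :=
  if number ≤ 0 then false
  else
    let ulam := (PySem.List.pyRange 3 (number + 1) 1).foldl ulamStepA [1, 2]
    -- A's final 'for overtaking in range(number)' returns on its first iteration;
    -- number ≥ 1 guarantees the loop body runs, so it is exactly the membership test
    ulam.contains number

-- ===== PORT B =====
-- one iteration of B's sweep: state = (ulam list, dict of pair-sum counts)
def ulamStepB (st : List Int × PySem.Dict Int Int) (c : Int) : List Int × PySem.Dict Int Int :=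
  if st.2.getD c 0 == 1 then
    (st.1 ++ [c], st.1.foldl (fun d v => d.modify (c + v) 0 (· + 1)) st.2)
  else st

def ulamNumbers_alt (number : Int) : Bool :=
  if number ≤ 0 then false
  else
    let st := (PySem.List.pyRange 3 (number + 1) 1).foldl ulamStepB
      ([1, 2], PySem.Dict.ofList [((3 : Int), (1 : Int))])
    st.1.contains number

-- ===== PRECONDITION & SPEC =====
def Spec_ulamNumbers (number : Int) (out : Bool) : Prop := out = ulamNumbers_alt number
instance (number : Int) (out : Bool) : Decidable (Spec_ulamNumbers number out) := by unfold Spec_ulamNumbers; infer_instance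

-- ===== CLAIM (what is proved, stated in full; the proofs are below) =====
def Claim_equal_ulamNumbers : Prop := ∀ (number : Int), Dom_ulamNumbers number → Spec_ulamNumbers number (ulamNumbers number)

-- ===== LEMMAS AND PROOFS =====

-- number of unordered pairs a < b from L with a + b = m (L nodup, so countP counts each once)
def pairCount (L : List Int) (m : Int) : Nat :=
  L.countP (fun a => decide (2 * a < m) && L.contains (m - a))

-- invariant carried along the sweep: L strictly increasing, elements in [1, c), dict = pairCount
def UlamInv (L : List Int) (d : PySem.Dict Int Int) (c : Int) : Prop :=
  L.Pairwise (· < ·) ∧ (∀ a ∈ L, 1 ≤ a ∧ a < c) ∧ (∀ m, d.getD m 0 = (pairCount L m : Int))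

theorem ulamInv_init : UlamInv [1, 2] (PySem.Dict.ofList [((3 : Int), (1 : Int))]) 3 := by
  refine ⟨by decide, by decide, ?_⟩
  intro m
  have hd : (PySem.Dict.ofList [((3 : Int), (1 : Int))]).getD m 0 = if m = 3 then 1 else 0 := by
    by_cases hm : m = 3
    · subst hm; decide
    · have h3m : ((3 : Int) == m) = false := by simpa using fun h => hm h.symm
      simp [PySem.Dict.ofList, PySem.Dict.update, PySem.Dict.insert, PySem.Dict.empty,
        PySem.Dict.getD, PySem.Dict.get?, PySem.Dict.contains, h3m, hm, List.find?]
  have hpc : pairCount [1, 2] m = if m = 3 then 1 else 0 := by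
    unfold pairCount
    by_cases hm : m = 3
    · subst hm; decide
    · rw [if_neg hm]
      simp [List.countP_cons]
      omega
  rw [hd, hpc]
  split <;> norm_num

-- A's inner count equals pairCount, under the invariant's shape facts
theorem coeff_eq_pairCount (L : List Int) (h : Int) (_h3 : 3 ≤ h)
    (hp : L.Pairwise (· < ·)) (hb : ∀ a ∈ L, 1 ≤ a ∧ a < h) :
    (PySem.List.pyRange 1 (if PySem.Int.mod h 2 == 1 then PySem.Int.floordiv h 2 + 1
                           else PySem.Int.floordiv h 2) 1).countP
      (fun k => L.contains k && L.contains (h - k)) = pairCount L h := by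
  set ind := (if PySem.Int.mod h 2 == 1 then PySem.Int.floordiv h 2 + 1
              else PySem.Int.floordiv h 2) with hind
  have hkey : ∀ k : Int, (k < ind ↔ 2 * k < h) := by
    intro k
    have hfd : PySem.Int.floordiv h 2 = h / 2 := by
      simp [PySem.Int.floordiv, Int.fdiv_eq_ediv]
    have hmod : PySem.Int.mod h 2 = h % 2 := by
      simp [PySem.Int.mod, Int.fmod_eq_emod]
    have hdm : 2 * (h / 2) + h % 2 = h := Int.mul_ediv_add_emod h 2
    have hm2 : h % 2 = 0 ∨ h % 2 = 1 := by omega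
    rcases hm2 with hm | hm
    · have hne : (PySem.Int.mod h 2 == 1) = false := by
        rw [hmod, hm]; decide
      have : ind = h / 2 := by rw [hind, hne, if_neg (by decide : ¬ false = true), hfd]
      omega
    · have heq : (PySem.Int.mod h 2 == 1) = true := by
        rw [hmod, hm]; decide
      have : ind = h / 2 + 1 := by rw [hind, heq, if_pos rfl, hfd]
      omega
  have hnd1 : (PySem.List.pyRange 1 ind 1).Nodup := PySem.List.nodup_pyRange_one 1 ind
  have hndL : L.Nodup := hp.nodup
  rw [List.countP_eq_length_filter, pairCount, List.countP_eq_length_filter]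
  apply List.Perm.length_eq
  rw [List.perm_ext_iff_of_nodup (hnd1.filter _) (hndL.filter _)]
  intro x
  simp only [List.mem_filter, PySem.List.mem_pyRange_one, Bool.and_eq_true,
    List.contains_iff_mem, decide_eq_true_eq]
  constructor
  · rintro ⟨⟨h1, h2⟩, hxL, hhx⟩
    exact ⟨hxL, (hkey x).mp h2, hhx⟩
  · rintro ⟨hxL, h2, hhx⟩
    exact ⟨⟨(hb x hxL).1, (hkey x).mpr h2⟩, hxL, hhx⟩

-- countP of a disjunction of pointwise-disjoint tests splits into a sum
theorem countP_or_disjoint (L : List Int) (p q : Int → Bool)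
    (h : ∀ a ∈ L, ¬(p a = true ∧ q a = true)) :
    L.countP (fun a => p a || q a) = L.countP p + L.countP q := by
  induction L with
  | nil => rfl
  | cons x t ih =>
    have hx := h x (List.mem_cons_self ..)
    have ht := ih (fun a ha => h a (List.mem_cons_of_mem _ ha))
    simp only [List.countP_cons, ht]
    cases hpx : p x <;> cases hqx : q x <;> simp_all <;> omega

-- appending c (all of L below c) adds exactly the pairs (m - c, c), m - c ∈ L
theorem pairCount_append (L : List Int) (c m : Int)
    (_hnd : L.Nodup) (hb : ∀ a ∈ L, 1 ≤ a ∧ a < c) :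
    pairCount (L ++ [c]) m = pairCount L m + L.count (m - c) := by
  have hcL : c ∉ L := fun hc => by have := (hb c hc).2; omega
  unfold pairCount
  rw [List.countP_append]
  have hsingle : [c].countP (fun a => decide (2 * a < m) && (L ++ [c]).contains (m - a)) = 0 := by
    simp only [List.countP_cons, List.countP_nil, List.contains_append, List.contains_cons,
      List.contains_nil]
    have hfalse : (decide (2 * c < m) && (L.contains (m - c) || ((m - c == c) || false))) = false := by
      rw [Bool.and_eq_false_iff]
      by_cases hlt : 2 * c < m
      · right
        simp only [Bool.or_eq_false_iff, beq_eq_false_iff_ne, ne_eq]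
        refine ⟨?_, ?_, trivial⟩
        · rw [← Bool.not_eq_true, List.contains_iff_mem]
          intro hmem; have := (hb _ hmem).2; omega
        · omega
      · left; simpa using hlt
    rw [hfalse]; rfl
  rw [hsingle, Nat.add_zero]
  have hcongr : L.countP (fun a => decide (2 * a < m) && (L ++ [c]).contains (m - a))
      = L.countP (fun a => (decide (2 * a < m) && L.contains (m - a))
                        || (decide (2 * a < m) && (m - a == c))) := by
    apply List.countP_congr
    intro a _
    simp only [List.contains_append, List.contains_cons, List.contains_nil, Bool.or_false,
      Bool.and_or_distrib_left]
  rw [hcongr, countP_or_disjoint]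
  · congr 1
    rw [List.count_eq_countP]
    apply List.countP_congr
    intro a ha
    by_cases hac : a = m - c
    · have h1 : (m - a == c) = true := by simp only [beq_iff_eq]; omega
      have h2 : (a == m - c) = true := by simp only [beq_iff_eq]; omega
      have hlt : (decide (2 * a < m)) = true := by
        simp only [decide_eq_true_eq]
        have := (hb a ha).2; omega
      simp [h1, h2, hlt]
    · have h1 : (m - a == c) = false := by simp only [beq_eq_false_iff_ne, ne_eq]; omega
      have h2 : (a == m - c) = false := by simp only [beq_eq_false_iff_ne, ne_eq]; omega
      simp [h1, h2]
  · intro a ha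
    rintro ⟨h1, h2⟩
    simp only [Bool.and_eq_true, List.contains_iff_mem, beq_iff_eq, decide_eq_true_eq] at h1 h2
    have : c ∈ L := by rw [← h2.2]; exact h1.2
    exact hcL this

-- one step preserves the invariant and keeps the two programs' lists equal
theorem ulamStep_eq (L : List Int) (d : PySem.Dict Int Int) (c : Int)
    (h3 : 3 ≤ c) (hinv : UlamInv L d c) :
    ulamStepA L c = (ulamStepB (L, d) c).1 ∧
      UlamInv (ulamStepB (L, d) c).1 (ulamStepB (L, d) c).2 (c + 1) := by
  obtain ⟨hp, hb, hd⟩ := hinv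
  simp only [ulamStepA, ulamStepB]
  rw [PySem.List.foldl_if_add_one (fun k => L.contains k && L.contains (c - k))]
  rw [coeff_eq_pairCount L c h3 hp hb]
  rw [hd c]
  have hcond : (((0 : Int) + (pairCount L c : Int)) == 1) = (((pairCount L c : Int)) == 1) := by
    rw [Int.zero_add]
  rw [hcond]
  by_cases hone : (pairCount L c : Int) = 1
  · have hbeq : (((pairCount L c : Int)) == 1) = true := by simp [hone]
    simp only [hbeq, if_true]
    refine ⟨trivial, ?_, ?_, ?_⟩
    · rw [List.pairwise_append]
      refine ⟨hp, List.pairwise_singleton _ _, ?_⟩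
      intro a ha b hbmem
      simp only [List.mem_singleton] at hbmem
      subst hbmem
      exact (hb a ha).2
    · intro a ha
      rcases List.mem_append.mp ha with h | h
      · have := hb a h; omega
      · simp only [List.mem_singleton] at h; omega
    · intro m
      rw [show List.foldl (fun d v => PySem.Dict.modify d (c + v) 0 (· + 1)) d L
            = List.foldl (fun d x => PySem.Dict.modify d x 0 (· + 1)) d
                (L.map (fun v => c + v)) from
          (List.foldl_map (f := fun v => c + v)
            (g := fun d x => PySem.Dict.modify d x 0 (· + 1))).symm]
      rw [PySem.Dict.getD_foldl_modify_add_one]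
      rw [hd m]
      rw [pairCount_append L c m hp.nodup hb]
      have hcnt : (L.map (fun v => c + v)).count m = L.count (m - c) := by
        rw [List.count_eq_countP, List.count_eq_countP, List.countP_map]
        apply List.countP_congr
        intro a _
        simp only [Function.comp_apply, beq_iff_eq]
        constructor <;> (intro hh; omega)
      rw [hcnt]
      push_cast
      ring
  · have hbeq : (((pairCount L c : Int)) == 1) = false := by
      simp only [beq_eq_false_iff_ne, ne_eq]; exact hone
    simp only [hbeq, Bool.false_eq_true, if_false]
    refine ⟨trivial, hp, ?_, hd⟩
    intro a ha
    have := hb a ha; omega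

-- the whole sweep: equal lists from any invariant-satisfying state
theorem ulamFold_eq (b : Int) : ∀ (a : Int) (L : List Int) (d : PySem.Dict Int Int),
    3 ≤ a → UlamInv L d a →
    (PySem.List.pyRange a b 1).foldl ulamStepA L
      = ((PySem.List.pyRange a b 1).foldl ulamStepB (L, d)).1 := by
  have main : ∀ (n : Nat) (a : Int) (L : List Int) (d : PySem.Dict Int Int),
      (b - a).toNat = n → 3 ≤ a → UlamInv L d a →
      (PySem.List.pyRange a b 1).foldl ulamStepA L
        = ((PySem.List.pyRange a b 1).foldl ulamStepB (L, d)).1 := by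
    intro n
    induction n with
    | zero =>
      intro a L d hn _ _
      rw [PySem.List.pyRange_one_eq_nil (by omega)]
      rfl
    | succ n ih =>
      intro a L d hn h3 hinv
      rw [PySem.List.pyRange_one_cons (by omega)]
      simp only [List.foldl_cons]
      obtain ⟨heq, hinv'⟩ := ulamStep_eq L d a h3 hinv
      rw [heq]
      have := ih (a + 1) (ulamStepB (L, d) a).1 (ulamStepB (L, d) a).2 (by omega) (by omega) hinv'
      rw [this]
  intro a L d h3 hinv
  exact main (b - a).toNat a L d rfl h3 hinv

-- ===== VERDICT (by name: the statement is the Claim_ definition above) =====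
theorem ulamNumbers_spec : Claim_equal_ulamNumbers := by
  intro number _
  unfold Spec_ulamNumbers ulamNumbers ulamNumbers_alt
  by_cases hle : number ≤ 0
  · simp [hle]
  · simp only [hle, if_false]
    rw [ulamFold_eq (number + 1) 3 [1, 2] _ (by norm_num) ulamInv_init]
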